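-- pv_equiv track=rewrite | github.com/xwu64/LeetCode | python/468-ValidateIPAddress/solution.py | validIPAddress
-- ===== SOURCE A (Python) =====
-- def validIPAddress(IP):
--     """
--     :type IP: str
--     :rtype: str
--     """
--
--     dec = ['1','2','3','4','5','6','7','8','9','0']
--     try:
--         if len(IP) >= 7 and len(IP) <= 15:
--             segments = IP.split('.')
--
--             if len(segments) == 4:
--                 for each in segments:
--                     if len(each) <=0 or len(each) > 3:
--                         return "Neither"
--
--                     for i in each:
--                         if not i in dec:
--                             return "Neither"
--
--                     if int(each) < 0 or int(each) > 255:
--                         return "Neither"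
--
--                     if len(each) > 1:
--                         if each[0] == '0':
--                             return "Neither"
--                 return "IPv4"
--
--         hex = ['1','2','3','4','5','6','7','8','9','0','a','b','c','d','e','f','A','B','C','D','E','F']
--         if len(IP) >= 15 and len(IP) <=39:
--             segments = IP.split(':')
--
--             if len(segments) == 8:
--                 for each in segments:
--                     if len(each) <=0 or len(each) > 4:
--                         return "Neither"
--
--                     for i in each:
--                         if not i in hex:
--                             return "Neither"
--
--                 return "IPv6"
--     except :
--         return "Neither"
--
--     return "Neither"
-- ===== SOURCE B (Python) =====
-- def _octet(s):
--     # regex "25[0-5]|2[0-4][0-9]|1[0-9][0-9]|[1-9][0-9]|[0-9]" expanded by length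
--     D = '0123456789'
--     n = len(s)
--     if n == 1:
--         return s in D
--     if n == 2:
--         return s[0] in '123456789' and s[1] in D
--     if n == 3:
--         return (s[0] == '1' and s[1] in D and s[2] in D) or \
--                (s[0] == '2' and ((s[1] in '01234' and s[2] in D) or
--                                  (s[1] == '5' and s[2] in '012345')))
--     return False
--
--
-- def _hextet(s):
--     return 1 <= len(s) <= 4 and all(c in '0123456789abcdefABCDEF' for c in s)
--
--
-- def validIPAddress(IP):
--     parts = IP.split('.')
--     if len(parts) == 4 and all(_octet(p) for p in parts):
--         return "IPv4"
--     parts = IP.split(':')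
--     if len(parts) == 8 and all(_hextet(p) for p in parts):
--         return "IPv6"
--     return "Neither"
-- ===== Notes on version B (the rewrite author's own statement) =====
-- stated objective: alternative
-- what changed: B replaces A's length gates, per-character list scans and int() range conversion by a purely structural pattern check: each dotted octet is matched against the expanded regex shape 25[0-5]|2[0-4][0-9]|1[0-9][0-9]|[1-9][0-9]|[0-9] by length and character classes (no integer conversion), and the redundant outer string-length gates are dropped since 4 octets / 8 hextets already bound the length.
import Mathlib
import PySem

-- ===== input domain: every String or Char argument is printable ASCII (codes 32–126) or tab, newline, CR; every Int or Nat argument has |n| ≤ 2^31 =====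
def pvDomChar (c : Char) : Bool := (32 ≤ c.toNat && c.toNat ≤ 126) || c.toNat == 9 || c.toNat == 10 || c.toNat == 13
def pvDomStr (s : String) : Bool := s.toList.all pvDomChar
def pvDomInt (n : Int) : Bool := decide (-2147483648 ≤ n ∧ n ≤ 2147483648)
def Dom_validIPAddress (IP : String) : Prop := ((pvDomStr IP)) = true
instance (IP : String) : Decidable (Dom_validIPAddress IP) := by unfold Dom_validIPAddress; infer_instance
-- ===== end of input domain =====

-- B validates each dotted octet by a purely structural length/character-class pattern
-- (the expanded regex 25[0-5]|2[0-4][0-9]|1[0-9][0-9]|[1-9][0-9]|[0-9]) instead of A's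
-- length gates, per-character list scans and int() range check; same return value.

-- ===== PORT A =====
def pvDec : List Char := ['1','2','3','4','5','6','7','8','9','0']
def pvHexA : List Char := ['1','2','3','4','5','6','7','8','9','0','a','b','c','d','e','f','A','B','C','D','E','F']

-- A's IPv4 for-loop with its early returns
def pvLoop4 : List (List Char) → String
  | [] => "IPv4"
  | each :: rest =>
    if each.length ≤ 0 ∨ each.length > 3 then "Neither"
    else if ¬ (each.all fun i => pvDec.contains i) then "Neither"
    else
      match PySem.Int.ofChars? each with
      | none => "Neither"                      -- int() raising is caught by A's try/except
      | some v =>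
        if v < 0 ∨ v > 255 then "Neither"
        else if 1 < each.length then
          match PySem.List.pyGet? each 0 with
          | none => "Neither"
          | some c0 => if c0 = '0' then "Neither" else pvLoop4 rest
        else pvLoop4 rest

-- A's IPv6 for-loop
def pvLoop6 : List (List Char) → String
  | [] => "IPv6"
  | each :: rest =>
    if each.length ≤ 0 ∨ each.length > 4 then "Neither"
    else if ¬ (each.all fun i => pvHexA.contains i) then "Neither"
    else pvLoop6 rest

-- the code A falls through to after the IPv4 branch
def pvV6Check (cs : List Char) : String :=
  if 15 ≤ cs.length ∧ cs.length ≤ 39 then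
    let segments := PySem.Chars.splitOn cs [':']
    if segments.length = 8 then pvLoop6 segments else "Neither"
  else "Neither"

def validIPAddress (IP : String) : String :=
  let cs := IP.toList
  if 7 ≤ cs.length ∧ cs.length ≤ 15 then
    let segments := PySem.Chars.splitOn cs ['.']
    if segments.length = 4 then pvLoop4 segments else pvV6Check cs
  else pvV6Check cs

-- ===== PORT B =====
def pvDigits : List Char := ['0','1','2','3','4','5','6','7','8','9']
def pvPos : List Char := ['1','2','3','4','5','6','7','8','9']
def pvHexB : List Char := ['0','1','2','3','4','5','6','7','8','9','a','b','c','d','e','f','A','B','C','D','E','F']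

def pvOctet : List Char → Bool
  | [a] => pvDigits.contains a
  | [a, b] => pvPos.contains a && pvDigits.contains b
  | [a, b, c] =>
      (a == '1' && pvDigits.contains b && pvDigits.contains c) ||
      (a == '2' && ((['0','1','2','3','4'].contains b && pvDigits.contains c) ||
                    (b == '5' && ['0','1','2','3','4','5'].contains c)))
  | _ => false

def pvHextet (s : List Char) : Bool :=
  decide (1 ≤ s.length) && decide (s.length ≤ 4) && s.all fun c => pvHexB.contains c

def validIPAddress_alt (IP : String) : String :=
  let cs := IP.toList
  let p4 := PySem.Chars.splitOn cs ['.']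
  if p4.length == 4 && p4.all pvOctet then "IPv4"
  else
    let p6 := PySem.Chars.splitOn cs [':']
    if p6.length == 8 && p6.all pvHextet then "IPv6" else "Neither"

-- ===== PRECONDITION & SPEC =====
def Spec_validIPAddress (IP : String) (out : String) : Prop := out = validIPAddress_alt IP
instance (IP : String) (out : String) : Decidable (Spec_validIPAddress IP out) := by unfold Spec_validIPAddress; infer_instance

-- ===== CLAIM (what is proved, stated in full; the proofs are below) =====
def Claim_equal_validIPAddress : Prop := ∀ (IP : String), Dom_validIPAddress IP → Spec_validIPAddress IP (validIPAddress IP)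

-- ===== LEMMAS AND PROOFS =====

-- reference single-character splitter, equal to PySem.Chars.splitOn cs [c]
def pvSplitC (c : Char) : List Char → List (List Char)
  | [] => [[]]
  | x :: xs => if x = c then [] :: pvSplitC c xs else (pvSplitC c xs).modifyHead (x :: ·)

theorem pvSplitC_ne_nil (c : Char) (l : List Char) : pvSplitC c l ≠ [] := by
  induction l with
  | nil => simp [pvSplitC]
  | cons x xs ih =>
    simp only [pvSplitC]
    split
    · simp
    · cases h : pvSplitC c xs with
      | nil => exact absurd h ih
      | cons hph t => simp [List.modifyHead]

theorem pvSplitC_go (c : Char) : ∀ (fuel : Nat) (l cur : List Char) (acc : List (List Char)),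
    l.length < fuel →
    PySem.Chars.splitOn.go [c] fuel l cur acc =
      acc.reverse ++ (pvSplitC c l).modifyHead (cur.reverse ++ ·) := by
  intro fuel
  induction fuel with
  | zero => intro l cur acc h; omega
  | succ n ih =>
    intro l cur acc h
    cases l with
    | nil =>
      rw [PySem.Chars.splitOn.go]
      simp [pvSplitC, List.modifyHead]
      omega
    | cons x xs =>
      rw [PySem.Chars.splitOn.go]
      simp only [List.isPrefixOf, List.length_cons] at *
      by_cases hx : c = x
      · subst hx
        simp only [BEq.rfl, Bool.true_and, if_pos]
        rw [show List.drop ([].length + 1) (c :: xs) = xs from by simp]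
        rw [ih xs [] _ (by omega)]
        simp only [pvSplitC, List.reverse_nil, List.modifyHead, List.nil_append]
        cases hsp : pvSplitC c xs <;> simp
      · have : (c == x) = false := by simp [hx]
        simp only [this, Bool.false_and, if_neg Bool.false_ne_true]
        rw [ih _ _ _ (by omega)]
        have hne : ¬ x = c := fun hh => hx hh.symm
        simp only [pvSplitC, if_neg hne]
        cases hsp : pvSplitC c xs with
        | nil => exact absurd hsp (pvSplitC_ne_nil c xs)
        | cons hph t => simp [List.modifyHead]

theorem pvSplitOn_eq (c : Char) (l : List Char) :
    PySem.Chars.splitOn l [c] = pvSplitC c l := by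
  unfold PySem.Chars.splitOn
  rw [pvSplitC_go c (l.length + 1) l [] [] (by omega)]
  cases h : pvSplitC c l with
  | nil => exact absurd h (pvSplitC_ne_nil c l)
  | cons hph t => simp [List.modifyHead]

theorem pvSplitC_len (c : Char) : ∀ l : List Char,
    l.length + 1 = ((pvSplitC c l).map List.length).sum + (pvSplitC c l).length := by
  intro l
  induction l with
  | nil => simp [pvSplitC]
  | cons x xs ih =>
    simp only [pvSplitC]
    split
    · simpa using by omega
    · cases hsp : pvSplitC c xs with
      | nil => exact absurd hsp (pvSplitC_ne_nil c xs)
      | cons hph t =>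
        rw [hsp] at ih
        simp only [List.modifyHead, List.map_cons, List.sum_cons, List.length_cons] at *
        omega

theorem pvSplitC_of_not_mem (c : Char) (l : List Char) (h : c ∉ l) : pvSplitC c l = [l] := by
  induction l with
  | nil => rfl
  | cons x xs ih =>
    simp only [List.mem_cons, not_or] at h
    have hxc : ¬ x = c := fun hh => h.1 (Eq.symm hh)
    simp only [pvSplitC, if_neg hxc, ih h.2, List.modifyHead]

theorem pvSep_mem_of_len (c : Char) (l : List Char) (h : 1 < (pvSplitC c l).length) : c ∈ l := by
  by_contra hc
  rw [pvSplitC_of_not_mem c l hc] at h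
  simp at h

theorem pvMem_splitC (c d : Char) (hne : d ≠ c) : ∀ l : List Char, d ∈ l →
    ∃ p ∈ pvSplitC c l, d ∈ p := by
  intro l
  induction l with
  | nil => simp
  | cons x xs ih =>
    intro hd
    by_cases hxc : x = c
    · subst hxc
      simp only [pvSplitC]
      rcases List.mem_cons.mp hd with rfl | hd'
      · exact absurd rfl hne
      · obtain ⟨p, hp, hdp⟩ := ih hd'
        exact ⟨p, List.mem_cons_of_mem _ hp, hdp⟩
    · simp only [pvSplitC, if_neg hxc]
      cases hsp : pvSplitC c xs with
      | nil => exact absurd hsp (pvSplitC_ne_nil c xs)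
      | cons hph t =>
        rcases List.mem_cons.mp hd with rfl | hd'
        · exact ⟨d :: hph, by simp [List.modifyHead], by simp⟩
        · obtain ⟨p, hp, hdp⟩ := ih hd'
          rw [hsp] at hp
          rcases List.mem_cons.mp hp with rfl | hpt
          · exact ⟨x :: p, by simp [List.modifyHead], by simp [hdp]⟩
          · exact ⟨p, by simp [List.modifyHead, hpt], hdp⟩

-- the per-segment pass/fail condition of A's IPv4 loop body
def pvAseg (each : List Char) : Bool :=
  if each.length ≤ 0 ∨ each.length > 3 then false
  else if ¬ (each.all fun i => pvDec.contains i) then false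
  else
    match PySem.Int.ofChars? each with
    | none => false
    | some v =>
      if v < 0 ∨ v > 255 then false
      else if 1 < each.length then
        match PySem.List.pyGet? each 0 with
        | none => false
        | some c0 => if c0 = '0' then false else true
      else true

-- the per-segment pass/fail condition of A's IPv6 loop body
def pvA6seg (each : List Char) : Bool :=
  if each.length ≤ 0 ∨ each.length > 4 then false
  else if ¬ (each.all fun i => pvHexA.contains i) then false
  else true

theorem pvLoop4_cons (s : List Char) (rest : List (List Char)) :
    pvLoop4 (s :: rest) = if pvAseg s then pvLoop4 rest else "Neither" := by
  simp only [pvLoop4]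
  by_cases h1 : s.length ≤ 0 ∨ s.length > 3
  · have hA : pvAseg s = false := by simp only [pvAseg]; rw [if_pos h1]
    rw [if_pos h1]; simp [hA]
  · rw [if_neg h1]
    by_cases h2 : ¬ (s.all fun i => pvDec.contains i) = true
    · have hA : pvAseg s = false := by simp only [pvAseg]; rw [if_neg h1, if_pos h2]
      rw [if_pos h2]; simp [hA]
    · rw [if_neg h2]
      cases h : PySem.Int.ofChars? s with
      | none =>
        have hA : pvAseg s = false := by
          simp only [pvAseg]; rw [if_neg h1, if_neg h2]; simp only [h]
        simp [hA]
      | some v =>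
        by_cases h3 : v < 0 ∨ v > 255
        · have hA : pvAseg s = false := by
            simp only [pvAseg]; rw [if_neg h1, if_neg h2]; simp only [h]; rw [if_pos h3]
          simp [hA, h3]
        · by_cases h4 : 1 < s.length
          · cases h0 : PySem.List.pyGet? s 0 with
            | none =>
              have hA : pvAseg s = false := by
                simp only [pvAseg]; rw [if_neg h1, if_neg h2]; simp only [h]
                rw [if_neg h3, if_pos h4]; simp only [h0]
              simp [hA, h3, h4]
            | some c0 =>
              by_cases h5 : c0 = '0'
              · have hA : pvAseg s = false := by
                  simp only [pvAseg]; rw [if_neg h1, if_neg h2]; simp only [h]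
                  rw [if_neg h3, if_pos h4]; simp only [h0]; rw [if_pos h5]
                simp [hA, h3, h4, h5]
              · have hA : pvAseg s = true := by
                  simp only [pvAseg]; rw [if_neg h1, if_neg h2]; simp only [h]
                  rw [if_neg h3, if_pos h4]; simp only [h0]; rw [if_neg h5]
                simp [hA, h3, h4, h5]
          · have hA : pvAseg s = true := by
              simp only [pvAseg]; rw [if_neg h1, if_neg h2]; simp only [h]
              rw [if_neg h3, if_neg h4]
            simp [hA, h3, h4]

theorem pvLoop4_eq_all : ∀ segs : List (List Char),
    pvLoop4 segs = if segs.all pvAseg then "IPv4" else "Neither" := by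
  intro segs
  induction segs with
  | nil => rfl
  | cons s rest ih =>
    rw [pvLoop4_cons, ih]
    cases h : pvAseg s <;> simp [h]

theorem pvLoop6_cons (s : List Char) (rest : List (List Char)) :
    pvLoop6 (s :: rest) = if pvA6seg s then pvLoop6 rest else "Neither" := by
  simp only [pvLoop6]
  by_cases h1 : s.length ≤ 0 ∨ s.length > 4
  · have hA : pvA6seg s = false := by simp only [pvA6seg]; rw [if_pos h1]
    rw [if_pos h1]; simp [hA]
  · rw [if_neg h1]
    by_cases h2 : ¬ (s.all fun i => pvHexA.contains i) = true
    · have hA : pvA6seg s = false := by simp only [pvA6seg]; rw [if_neg h1, if_pos h2]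
      rw [if_pos h2]; simp [hA]
    · have hA : pvA6seg s = true := by simp only [pvA6seg]; rw [if_neg h1, if_neg h2]
      rw [if_neg h2]; simp [hA]

theorem pvLoop6_eq_all : ∀ segs : List (List Char),
    pvLoop6 segs = if segs.all pvA6seg then "IPv6" else "Neither" := by
  intro segs
  induction segs with
  | nil => rfl
  | cons s rest ih =>
    rw [pvLoop6_cons, ih]
    cases h : pvA6seg s <;> simp [h]

-- kernel check of the per-octet equivalence on all-digit segments
set_option maxRecDepth 10000 in
theorem pvSeg1b : (pvDec.all fun a => pvAseg [a] == pvOctet [a]) = true := by decide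
set_option maxRecDepth 10000 in
theorem pvSeg2b : (pvDec.all fun a => pvDec.all fun b => pvAseg [a,b] == pvOctet [a,b]) = true := by decide
set_option maxRecDepth 10000 in
theorem pvSeg3b : (pvDec.all fun a => pvDec.all fun b => pvDec.all fun c =>
    pvAseg [a,b,c] == pvOctet [a,b,c]) = true := by decide

theorem pvDec_iff (a : Char) : a ∈ pvDec ↔ a ∈ pvDigits := by
  simp [pvDec, pvDigits]; tauto

theorem pvAseg_false_of_bad (s : List Char) (x : Char) (hx : x ∈ s) (hnx : x ∉ pvDec) :
    pvAseg s = false := by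
  simp only [pvAseg]
  by_cases h1 : s.length ≤ 0 ∨ s.length > 3
  · rw [if_pos h1]
  · rw [if_neg h1, if_pos (show ¬ (s.all fun i => pvDec.contains i) = true from
      fun hall => hnx (by simpa [List.contains_eq_mem] using List.all_eq_true.mp hall x hx))]

theorem pvOctet_false_of_bad (s : List Char) (x : Char) (hx : x ∈ s) (hnx : x ∉ pvDigits) :
    pvOctet s = false := by
  have hn : ¬x = '0' ∧ ¬x = '1' ∧ ¬x = '2' ∧ ¬x = '3' ∧ ¬x = '4' ∧ ¬x = '5' ∧ ¬x = '6' ∧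
      ¬x = '7' ∧ ¬x = '8' ∧ ¬x = '9' := by simpa [pvDigits, not_or] using hnx
  obtain ⟨n0, n1, n2, n3, n4, n5, n6, n7, n8, n9⟩ := hn
  rcases s with _ | ⟨a, _ | ⟨b, _ | ⟨c, _ | ⟨d, t⟩⟩⟩⟩
  · simp at hx
  · rcases (by simpa using hx : x = a) with rfl
    simp [pvOctet, pvDigits, n0, n1, n2, n3, n4, n5, n6, n7, n8, n9]
  · rcases (by simpa using hx : x = a ∨ x = b) with rfl | rfl <;>
      simp [pvOctet, pvPos, pvDigits, n0, n1, n2, n3, n4, n5, n6, n7, n8, n9]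
  · rcases (by simpa using hx : x = a ∨ x = b ∨ x = c) with rfl | rfl | rfl <;>
      simp [pvOctet, pvDigits, n0, n1, n2, n3, n4, n5, n6, n7, n8, n9]
  · simp [pvOctet]

theorem pvAseg_eq_pvOctet (s : List Char) : pvAseg s = pvOctet s := by
  have hseg1 := pvSeg1b; have hseg2 := pvSeg2b; have hseg3 := pvSeg3b
  simp only [List.all_eq_true, beq_iff_eq] at hseg1 hseg2 hseg3
  by_cases hgood : ∀ x ∈ s, x ∈ pvDec
  · rcases s with _ | ⟨a, _ | ⟨b, _ | ⟨c, _ | ⟨d, t⟩⟩⟩⟩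
    · rfl
    · exact hseg1 a (hgood a (by simp))
    · exact hseg2 a (hgood a (by simp)) b (hgood b (by simp))
    · exact hseg3 a (hgood a (by simp)) b (hgood b (by simp)) c (hgood c (by simp))
    · simp only [pvAseg, pvOctet]
      rw [if_pos (by simp)]
  · push Not at hgood
    obtain ⟨x, hx, hnx⟩ := hgood
    rw [pvAseg_false_of_bad s x hx hnx,
        pvOctet_false_of_bad s x hx (fun h => hnx ((pvDec_iff x).mpr h))]

theorem pvHex_iff (a : Char) : a ∈ pvHexA ↔ a ∈ pvHexB := by
  simp [pvHexA, pvHexB]; tauto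

theorem pvA6seg_eq_pvHextet (s : List Char) : pvA6seg s = pvHextet s := by
  have hfun : (fun i => pvHexA.contains i) = (fun c => pvHexB.contains c) :=
    funext fun x => by
      simp only [List.contains_eq_mem]
      exact decide_eq_decide.mpr (pvHex_iff x)
  simp only [pvA6seg, pvHextet, hfun]
  by_cases h1 : s.length ≤ 0 ∨ s.length > 4
  · rw [if_pos h1]
    have hf : (decide (1 ≤ s.length) && decide (s.length ≤ 4)) = false := by
      simp only [Bool.and_eq_false_iff, decide_eq_false_iff_not]
      omega
    rw [hf, Bool.false_and]
  · rw [if_neg h1]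
    have ht : (decide (1 ≤ s.length) && decide (s.length ≤ 4)) = true := by
      simp only [Bool.and_eq_true, decide_eq_true_eq]
      omega
    rw [ht, Bool.true_and]
    by_cases h2 : ¬ (s.all fun c => pvHexB.contains c) = true
    · rw [if_pos h2]
      symm
      simpa using h2
    · rw [if_neg h2]
      symm
      simpa using h2

theorem pvOctet_len (s : List Char) (h : pvOctet s = true) : 1 ≤ s.length ∧ s.length ≤ 3 := by
  rcases s with _ | ⟨a, _ | ⟨b, _ | ⟨c, _ | ⟨d, t⟩⟩⟩⟩ <;> simp_all [pvOctet]

theorem pvHextet_len (s : List Char) (h : pvHextet s = true) : 1 ≤ s.length ∧ s.length ≤ 4 := by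
  simp only [pvHextet, Bool.and_eq_true, decide_eq_true_eq] at h
  exact ⟨h.1.1, h.1.2⟩

theorem pvLen4_bounds (cs : List Char) (h4 : (pvSplitC '.' cs).length = 4)
    (hall : (pvSplitC '.' cs).all pvOctet = true) : 7 ≤ cs.length ∧ cs.length ≤ 15 := by
  have hlen := pvSplitC_len '.' cs
  rcases hp : pvSplitC '.' cs with _ | ⟨p1, _ | ⟨p2, _ | ⟨p3, _ | ⟨p4, _ | ⟨p5, t⟩⟩⟩⟩⟩ <;>
    rw [hp] at h4 hall hlen <;> simp at h4
  simp only [List.all_cons, List.all_nil, Bool.and_eq_true, Bool.and_true] at hall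
  obtain ⟨a1, a2, a3, a4⟩ := hall
  have b1 := pvOctet_len _ a1
  have b2 := pvOctet_len _ a2
  have b3 := pvOctet_len _ a3
  have b4 := pvOctet_len _ a4
  simp only [List.map_cons, List.map_nil, List.sum_cons, List.sum_nil, List.length_cons,
    List.length_nil] at hlen
  omega

theorem pvLen8_bounds (cs : List Char) (h8 : (pvSplitC ':' cs).length = 8)
    (hall : (pvSplitC ':' cs).all pvHextet = true) : 15 ≤ cs.length ∧ cs.length ≤ 39 := by
  have hlen := pvSplitC_len ':' cs
  rcases hp : pvSplitC ':' cs with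
    _ | ⟨p1, _ | ⟨p2, _ | ⟨p3, _ | ⟨p4, _ | ⟨p5, _ | ⟨p6, _ | ⟨p7, _ | ⟨p8, _ | ⟨p9, t⟩⟩⟩⟩⟩⟩⟩⟩⟩ <;>
    rw [hp] at h8 hall hlen <;> simp at h8
  simp only [List.all_cons, List.all_nil, Bool.and_eq_true, Bool.and_true] at hall
  obtain ⟨a1, a2, a3, a4, a5, a6, a7, a8⟩ := hall
  have b1 := pvHextet_len _ a1
  have b2 := pvHextet_len _ a2
  have b3 := pvHextet_len _ a3
  have b4 := pvHextet_len _ a4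
  have b5 := pvHextet_len _ a5
  have b6 := pvHextet_len _ a6
  have b7 := pvHextet_len _ a7
  have b8 := pvHextet_len _ a8
  simp only [List.map_cons, List.map_nil, List.sum_cons, List.sum_nil, List.length_cons,
    List.length_nil] at hlen
  omega

theorem pvDot_kills_v6 (cs : List Char) (hdot : '.' ∈ cs) :
    (pvSplitC ':' cs).all pvHextet = false := by
  obtain ⟨p, hp, hdp⟩ := pvMem_splitC ':' '.' (by decide) cs hdot
  have hp' : pvHextet p = false := by
    simp only [pvHextet]
    have hall : (p.all fun c => pvHexB.contains c) = false :=
      List.all_eq_false.mpr ⟨'.', hdp, by decide⟩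
    rw [hall, Bool.and_false]
  exact List.all_eq_false.mpr ⟨p, hp, by simp [hp']⟩

-- A's fall-through code equals B's IPv6 part
theorem pvA6_funext : pvA6seg = pvHextet := funext pvA6seg_eq_pvHextet
theorem pvAseg_funext : pvAseg = pvOctet := funext pvAseg_eq_pvOctet

theorem pvV6_eq (cs : List Char) :
    pvV6Check cs =
      (if ((PySem.Chars.splitOn cs [':']).length == 8 &&
           (PySem.Chars.splitOn cs [':']).all pvHextet) = true then "IPv6" else "Neither") := by
  unfold pvV6Check
  rw [pvSplitOn_eq]
  by_cases h8 : (pvSplitC ':' cs).length = 8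
  · by_cases hall : (pvSplitC ':' cs).all pvHextet = true
    · have hb := pvLen8_bounds cs h8 hall
      rw [if_pos hb, if_pos h8, pvLoop6_eq_all, pvA6_funext, if_pos hall,
        if_pos (show ((pvSplitC ':' cs).length == 8 && (pvSplitC ':' cs).all pvHextet) = true by
          simp [h8, hall])]
    · have hallf : (pvSplitC ':' cs).all pvHextet = false := by simpa using hall
      rw [show ((pvSplitC ':' cs).length == 8 && (pvSplitC ':' cs).all pvHextet) = false by
        rw [hallf, Bool.and_false]]
      by_cases hg : 15 ≤ cs.length ∧ cs.length ≤ 39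
      · rw [if_pos hg, if_pos h8, pvLoop6_eq_all, pvA6_funext, hallf]
      · rw [if_neg hg]
        simp
  · rw [show ((pvSplitC ':' cs).length == 8 && (pvSplitC ':' cs).all pvHextet) = false by
      simp [h8]]
    by_cases hg : 15 ≤ cs.length ∧ cs.length ≤ 39
    · rw [if_pos hg, if_neg h8]
      simp
    · rw [if_neg hg]
      simp

-- ===== VERDICT (by name: the statement is the Claim_ definition above) =====
theorem validIPAddress_spec : Claim_equal_validIPAddress := by
  intro IP _
  unfold Spec_validIPAddress validIPAddress validIPAddress_alt
  simp only []
  set cs := IP.toList with hcs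
  rw [pvSplitOn_eq '.' cs]
  by_cases h4 : (pvSplitC '.' cs).length = 4
  · by_cases hall : (pvSplitC '.' cs).all pvOctet = true
    · have hb := pvLen4_bounds cs h4 hall
      rw [if_pos hb, if_pos h4, pvLoop4_eq_all, pvAseg_funext, if_pos hall,
        if_pos (show ((pvSplitC '.' cs).length == 4 && (pvSplitC '.' cs).all pvOctet) = true by
          simp [h4, hall])]
    · have hallf : (pvSplitC '.' cs).all pvOctet = false := by simpa using hall
      have hdot : '.' ∈ cs := pvSep_mem_of_len '.' cs (by omega)
      have hv6 : (pvSplitC ':' cs).all pvHextet = false := pvDot_kills_v6 cs hdot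
      rw [show ((pvSplitC '.' cs).length == 4 && (pvSplitC '.' cs).all pvOctet) = false by
        rw [hallf, Bool.and_false]]
      rw [show ((PySem.Chars.splitOn cs [':']).length == 8 &&
          (PySem.Chars.splitOn cs [':']).all pvHextet) = false by
        rw [pvSplitOn_eq, hv6, Bool.and_false]]
      by_cases hg : 7 ≤ cs.length ∧ cs.length ≤ 15
      · rw [if_pos hg, if_pos h4, pvLoop4_eq_all, pvAseg_funext, hallf]
        simp
      · rw [if_neg hg, pvV6_eq, pvSplitOn_eq,
          show ((pvSplitC ':' cs).length == 8 && (pvSplitC ':' cs).all pvHextet) = false by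
            rw [hv6, Bool.and_false]]
        simp
  · rw [show ((pvSplitC '.' cs).length == 4 && (pvSplitC '.' cs).all pvOctet) = false by
      simp [h4]]
    rw [← pvV6_eq cs]
    by_cases hg : 7 ≤ cs.length ∧ cs.length ≤ 15
    · rw [if_pos hg, if_neg h4]
      simp
    · rw [if_neg hg]
      simp
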